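-- pv_equiv track=rewrite | github.com/miliar/Code_Jam_Webscraper | solutions_python/solutions_year11_round0_nr3/235.py | process_one_case
-- ===== SOURCE A (Python) =====
-- def process_one_case(case):
--     minn = case[0]
--     t=0
--     sumn=0
--     for n in case:
--         t=t^n
--         sumn+=n
--         if n<minn:
--             minn=n
--     if t:
--         return 'NO'
--     else:
--         return str(sumn-minn)
-- ===== SOURCE B (Python) =====
-- def process_one_case(case):
--     s = sorted(case)
--     t = 0
--     for n in s:
--         t ^= n
--     if t:
--         return 'NO'
--     return str(sum(s[1:]))
-- ===== Notes on version B (the rewrite author's own statement) =====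
-- stated objective: alternative
-- what changed: B sorts the list once and answers with the sum of everything after the first (smallest) sorted element, xoring the sorted copy; A's fused single loop tracking xor, running sum and running min, and the final subtraction, all disappear.
import Mathlib
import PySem

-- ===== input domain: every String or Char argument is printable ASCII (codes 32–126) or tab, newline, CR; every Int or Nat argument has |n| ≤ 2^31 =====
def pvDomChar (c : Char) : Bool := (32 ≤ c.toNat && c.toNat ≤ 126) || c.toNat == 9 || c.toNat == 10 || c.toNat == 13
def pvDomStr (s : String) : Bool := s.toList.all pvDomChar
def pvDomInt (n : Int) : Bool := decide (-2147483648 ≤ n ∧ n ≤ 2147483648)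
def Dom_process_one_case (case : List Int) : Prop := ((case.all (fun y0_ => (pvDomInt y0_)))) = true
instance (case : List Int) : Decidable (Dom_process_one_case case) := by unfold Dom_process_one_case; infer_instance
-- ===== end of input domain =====

-- B sorts the list once and answers with the sum of everything after the first (smallest) element,
-- replacing A's fused running xor/sum/min loop; alternative decomposition, not faster.

-- ===== PORT A =====
def process_one_case (case : List Int) : String :=
  match PySem.List.pyGet? case 0 with
  | none => ""   -- unreachable under Pre_ (subscripting the head of the empty list raises IndexError)
  | some m0 =>
    let st := case.foldl
      (fun (st : Int × Int × Int) n =>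
        (PySem.Int.bxor st.1 n, st.2.1 + n, if n < st.2.2 then n else st.2.2))
      (0, 0, m0)
    if st.1 ≠ 0 then "NO" else PySem.Int.toStr (st.2.1 - st.2.2)

-- ===== PORT B =====
def process_one_case_alt (case : List Int) : String :=
  let s := PySem.List.sorted case (fun x => x) false
  let t := s.foldl (fun a n => PySem.Int.bxor a n) 0
  if t ≠ 0 then "NO"
  else PySem.Int.toStr ((PySem.List.slice s (some 1) none).foldl (· + ·) 0)

-- ===== PRECONDITION & SPEC =====
-- A subscripts the first element and raises IndexError on the empty list; Pre_ excludes exactly that input.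
def Pre_process_one_case (case : List Int) : Prop := case ≠ []
instance (case : List Int) : Decidable (Pre_process_one_case case) := by unfold Pre_process_one_case; infer_instance
def pvWitness_process_one_case : List Int := [3, 5, 6]

def Spec_process_one_case (case : List Int) (out : String) : Prop := out = process_one_case_alt case
instance (case : List Int) (out : String) : Decidable (Spec_process_one_case case out) := by unfold Spec_process_one_case; infer_instance

-- ===== CLAIM (what is proved, stated in full; the proofs are below) =====
def Claim_equal_process_one_case : Prop := ∀ (case : List Int), Dom_process_one_case case → Pre_process_one_case case → Spec_process_one_case case (process_one_case case)

-- ===== LEMMAS AND PROOFS =====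

-- sign/magnitude coding of Python's infinite two's complement, used to get bxor's right-commutativity
def pvDec (s : Bool) (m : Nat) : Int := if s then -(m : Int) - 1 else (m : Int)

theorem pv_bxor_enc (s1 s2 : Bool) (m1 m2 : Nat) :
    PySem.Int.bxor (pvDec s1 m1) (pvDec s2 m2) = pvDec (xor s1 s2) (m1 ^^^ m2) := by
  unfold PySem.Int.bxor pvDec
  cases s1 <;> cases s2 <;> simp <;> omega

theorem pv_dec_surj (a : Int) : ∃ (s : Bool) (m : Nat), a = pvDec s m := by
  cases a with
  | ofNat n => exact ⟨false, n, rfl⟩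
  | negSucc n => exact ⟨true, n, by simp [pvDec, Int.negSucc_eq]; omega⟩

theorem pv_bxor_right_comm (z x y : Int) :
    PySem.Int.bxor (PySem.Int.bxor z x) y = PySem.Int.bxor (PySem.Int.bxor z y) x := by
  obtain ⟨sz, mz, rfl⟩ := pv_dec_surj z
  obtain ⟨sx, mx, rfl⟩ := pv_dec_surj x
  obtain ⟨sy, my, rfl⟩ := pv_dec_surj y
  rw [pv_bxor_enc, pv_bxor_enc, pv_bxor_enc, pv_bxor_enc]
  congr 1
  · cases sz <;> cases sx <;> cases sy <;> rfl
  · rw [Nat.xor_assoc, Nat.xor_assoc, Nat.xor_comm mx]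

-- the fused loop of A is the triple of three independent folds
theorem pv_fused (xs : List Int) (t s m : Int) :
    xs.foldl (fun (st : Int × Int × Int) n =>
        (PySem.Int.bxor st.1 n, st.2.1 + n, if n < st.2.2 then n else st.2.2)) (t, s, m)
      = (xs.foldl (fun a n => PySem.Int.bxor a n) t,
         xs.foldl (· + ·) s,
         xs.foldl min m) := by
  induction xs generalizing t s m with
  | nil => rfl
  | cons x xs ih =>
    simp only [List.foldl_cons]
    have hm : (if x < m then x else m) = min m x := by
      rw [min_def]; split_ifs <;> omega
    rw [hm, ih]

-- folding min from an initial value a is m when m bounds everything and occurs among a :: l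
theorem pv_foldl_min (l : List Int) (a m : Int) (h1 : m ≤ a) (h2 : m = a ∨ m ∈ l)
    (h3 : ∀ y ∈ l, m ≤ y) : l.foldl min a = m := by
  induction l generalizing a with
  | nil => simpa using h2.resolve_right (by simp) |>.symm
  | cons y l ih =>
    simp only [List.foldl_cons]
    have hmy : m ≤ y := h3 y (by simp)
    have h3' : ∀ z ∈ l, m ≤ z := fun z hz => h3 z (by simp [hz])
    rcases h2 with h2 | h2
    · subst h2; rw [min_eq_left hmy]
      exact ih m le_rfl (Or.inl rfl) h3'
    · rcases List.mem_cons.mp h2 with h | h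
      · subst h; rw [min_eq_right h1]
        exact ih m le_rfl (Or.inl rfl) h3'
      · exact ih (min a y) (le_min h1 hmy) (Or.inr h) h3'

theorem process_one_case_eq (x : Int) (xs : List Int) :
    process_one_case (x :: xs) = process_one_case_alt (x :: xs) := by
  -- name the sorted copy and split it
  obtain ⟨m, u, hs⟩ : ∃ m u, PySem.List.sorted (x :: xs) (fun v => v) false = m :: u := by
    cases h : PySem.List.sorted (x :: xs) (fun v => v) false with
    | nil => exact absurd ((PySem.List.sorted_eq_nil_iff (x :: xs) (fun v => v) false).mp h) (by simp)
    | cons m u => exact ⟨m, u, rfl⟩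
  have hperm : (m :: u).Perm (x :: xs) := hs ▸ PySem.List.sorted_perm (x :: xs) (fun v => v) false
  have hle : ∀ y ∈ x :: xs, m ≤ y := by
    intro y hy
    simpa using PySem.List.key_head_sorted_le (xs := x :: xs) (key := fun v => v) hs y hy
  -- B's xor fold over the sorted copy equals A's xor fold over the input
  have hxor : ∀ t : Int, (PySem.List.sorted (x :: xs) (fun v => v) false).foldl
      (fun a n => PySem.Int.bxor a n) t = (x :: xs).foldl (fun a n => PySem.Int.bxor a n) t := by
    intro t
    exact (PySem.List.sorted_perm (x :: xs) (fun v => v) false).foldl_eq'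
      (fun a _ b _ z => pv_bxor_right_comm z a b) t
  -- A's running min is the head of the sorted copy
  have hmin : (x :: xs).foldl min x = m := by
    rw [List.foldl_cons, min_self]
    have hm_mem : m ∈ x :: xs := hperm.mem_iff.mp (by simp)
    exact pv_foldl_min xs x m (hle x (by simp)) (List.mem_cons.mp hm_mem)
      (fun y hy => hle y (by simp [hy]))
  -- A's running sum minus the min is the sum of the sorted tail
  have hsum : (x :: xs).foldl (· + ·) 0 - m = u.foldl (· + ·) 0 := by
    rw [← List.sum_eq_foldl, ← List.sum_eq_foldl, ← hperm.sum_eq, List.sum_cons]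
    ring
  simp only [process_one_case, process_one_case_alt, PySem.List.pyGet?_zero_cons,
    PySem.List.slice_from_one, pv_fused]
  rw [hxor 0, hs]
  split_ifs with h
  · rfl
  · simp only [List.tail_cons]
    rw [hmin, hsum]

-- ===== VERDICT (by name: the statement is the Claim_ definition above) =====
theorem process_one_case_spec : Claim_equal_process_one_case := by
  intro case _ hpre
  cases case with
  | nil => exact absurd rfl hpre
  | cons x xs => exact process_one_case_eq x xs
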